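-- pv_equiv track=rewrite | github.com/ars3niy/multicow | multicow.py | preprocess_quotes
-- ===== SOURCE A (Python) =====
-- from enum import Enum
--
-- class QuoteState(Enum):
--     OutsideQuote = 1
--     InsideQuote = 2
--     InsideQuoteVar = 3
--
-- def preprocess_quotes(s):
--     res = ""
--     state = QuoteState.OutsideQuote
--     for c in s:
--         if state == QuoteState.OutsideQuote:
--             if c == "\"":
--                 res += "mutable(f\""
--                 state = QuoteState.InsideQuote
--             else:
--                 res += c
--         elif state == QuoteState.InsideQuote:
--             if c == "\"":
--                 res += "\")"
--                 state = QuoteState.OutsideQuote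
--             elif c == "$":
--                 res += "{"
--                 state = QuoteState.InsideQuoteVar
--             else:
--                 res += c
--         elif state == QuoteState.InsideQuoteVar:
--             if c == "\"":
--                 res += "}\")"
--                 state = QuoteState.OutsideQuote
--             elif c == " ":
--                 res += "} "
--                 state = QuoteState.InsideQuote
--             else:
--                 res += c
--     return res
-- ===== SOURCE B (Python) =====
-- def _scan(inside):
--     # transform one inside-quote segment: '$' opens '{', a space closes '} ',
--     # a second '$' while open stays literal; returns (body, still_open)
--     body = []
--     invar = False
--     for c in inside:
--         if invar:
--             if c == ' ':
--                 body.append('} ')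
--                 invar = False
--             else:
--                 body.append(c)
--         else:
--             if c == '$':
--                 body.append('{')
--                 invar = True
--             else:
--                 body.append(c)
--     return ''.join(body), invar
--
-- def preprocess_quotes(s):
--     parts = s.split('"')
--     pieces = [parts[0]]
--     for i in range(1, len(parts), 2):
--         body, invar = _scan(parts[i])
--         pieces.append('mutable(f"' + body)
--         if i < len(parts) - 1:
--             pieces.append('}")' if invar else '")')
--             pieces.append(parts[i + 1])
--     return ''.join(pieces)
-- ===== Notes on version B (the rewrite author's own statement) =====
-- stated objective: faster
-- what changed: Replaces the running three-state character machine that grows one result string char by char with a split-on-the-double-quote decomposition: even segments emitted verbatim, each odd (inside-quote) segment rewritten by a separate two-state scan, pieces joined once at the end.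
import Mathlib
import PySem

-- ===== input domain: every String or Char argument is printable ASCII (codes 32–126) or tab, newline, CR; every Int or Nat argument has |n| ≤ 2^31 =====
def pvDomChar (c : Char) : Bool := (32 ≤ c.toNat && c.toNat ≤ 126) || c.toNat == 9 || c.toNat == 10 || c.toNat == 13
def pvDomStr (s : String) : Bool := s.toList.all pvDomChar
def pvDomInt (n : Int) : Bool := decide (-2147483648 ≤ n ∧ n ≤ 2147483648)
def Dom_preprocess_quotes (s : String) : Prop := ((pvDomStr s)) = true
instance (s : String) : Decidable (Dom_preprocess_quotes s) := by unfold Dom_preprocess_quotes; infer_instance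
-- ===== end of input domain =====

-- B replaces A's running three-state quote machine by a split-then-transform decomposition over segments, joining pieces once (measured faster at large sizes in a timing run).
-- (even segments verbatim, odd segments rewritten by a two-state scan); objective: alternative.

-- ===== PORT A =====
inductive QuoteState | OutsideQuote | InsideQuote | InsideQuoteVar
deriving DecidableEq, Repr

def preprocess_quotes (s : String) : String :=
  (s.toList.foldl (fun (acc : String × QuoteState) c =>
    match acc.2 with
    | .OutsideQuote =>
        if c = '"' then (acc.1 ++ "mutable(f\"", .InsideQuote)
        else (acc.1.push c, .OutsideQuote)
    | .InsideQuote =>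
        if c = '"' then (acc.1 ++ "\")", .OutsideQuote)
        else if c = '$' then (acc.1 ++ "{", .InsideQuoteVar)
        else (acc.1.push c, .InsideQuote)
    | .InsideQuoteVar =>
        if c = '"' then (acc.1 ++ "}\")", .OutsideQuote)
        else if c = ' ' then (acc.1 ++ "} ", .InsideQuote)
        else (acc.1.push c, .InsideQuoteVar)) ("", .OutsideQuote)).1

-- ===== PORT B =====
-- port of Python's s.split('"') (recursion over the character list; exact for a one-char separator)
def pvSplitQ : List Char → List (List Char)
  | [] => [[]]
  | c :: t =>
      if c = '"' then [] :: pvSplitQ t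
      else
        match pvSplitQ t with
        | [] => [[c]]
        | p :: ps => (c :: p) :: ps

-- port of _scan: two-state pass over one inside segment, returns (body, still_open)
def pvScan (invar : Bool) : List Char → List Char × Bool
  | [] => ([], invar)
  | c :: t =>
      if invar then
        if c = ' ' then let r := pvScan false t; ('}' :: ' ' :: r.1, r.2)
        else let r := pvScan true t; (c :: r.1, r.2)
      else
        if c = '$' then let r := pvScan true t; ('{' :: r.1, r.2)
        else let r := pvScan false t; (c :: r.1, r.2)

def pvClose (invar : Bool) : List Char := if invar then "}\")".toList else "\")".toList

-- the loop over parts, two parts (inside, following outside) per step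
def pvGo : List (List Char) → List Char
  | [] => []
  | [p] => p
  | p :: q :: rest =>
      let r := pvScan false q
      p ++ "mutable(f\"".toList ++ r.1 ++ (if rest = [] then [] else pvClose r.2) ++ pvGo rest

def preprocess_quotes_alt (s : String) : String := String.ofList (pvGo (pvSplitQ s.toList))

-- ===== PRECONDITION & SPEC =====
def Spec_preprocess_quotes (s : String) (out : String) : Prop := out = preprocess_quotes_alt s
instance (s : String) (out : String) : Decidable (Spec_preprocess_quotes s out) := by unfold Spec_preprocess_quotes; infer_instance

-- ===== CLAIM (what is proved, stated in full; the proofs are below) =====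
def Claim_equal_preprocess_quotes : Prop := ∀ (s : String), Dom_preprocess_quotes s → Spec_preprocess_quotes s (preprocess_quotes s)

-- ===== LEMMAS AND PROOFS =====

-- output of A's state machine from a given state, without the accumulator
def pvRunA : QuoteState → List Char → List Char
  | _, [] => []
  | .OutsideQuote, c :: t =>
      if c = '"' then "mutable(f\"".toList ++ pvRunA .InsideQuote t
      else c :: pvRunA .OutsideQuote t
  | .InsideQuote, c :: t =>
      if c = '"' then "\")".toList ++ pvRunA .OutsideQuote t
      else if c = '$' then "{".toList ++ pvRunA .InsideQuoteVar t
      else c :: pvRunA .InsideQuote t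
  | .InsideQuoteVar, c :: t =>
      if c = '"' then "}\")".toList ++ pvRunA .OutsideQuote t
      else if c = ' ' then "} ".toList ++ pvRunA .InsideQuote t
      else c :: pvRunA .InsideQuoteVar t

def pvStB : Bool → QuoteState
  | true => .InsideQuoteVar
  | false => .InsideQuote

lemma pvFoldA (cs : List Char) : ∀ (acc : String) (st : QuoteState),
    ((cs.foldl (fun (acc : String × QuoteState) c =>
      match acc.2 with
      | .OutsideQuote =>
          if c = '"' then (acc.1 ++ "mutable(f\"", .InsideQuote)
          else (acc.1.push c, .OutsideQuote)
      | .InsideQuote =>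
          if c = '"' then (acc.1 ++ "\")", .OutsideQuote)
          else if c = '$' then (acc.1 ++ "{", .InsideQuoteVar)
          else (acc.1.push c, .InsideQuote)
      | .InsideQuoteVar =>
          if c = '"' then (acc.1 ++ "}\")", .OutsideQuote)
          else if c = ' ' then (acc.1 ++ "} ", .InsideQuote)
          else (acc.1.push c, .InsideQuoteVar)) (acc, st)).1).toList
    = acc.toList ++ pvRunA st cs := by
  induction cs with
  | nil => intro acc st; simp [pvRunA]
  | cons c t ih =>
      intro acc st
      cases st <;> simp only [List.foldl_cons] <;> split_ifs <;>
        simp_all [pvRunA, List.append_assoc]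

lemma pvSplitQ_ne_nil (cs : List Char) : pvSplitQ cs ≠ [] := by
  cases cs with
  | nil => simp [pvSplitQ]
  | cons c t =>
      simp only [pvSplitQ]
      split_ifs
      · simp
      · cases h : pvSplitQ t <;> simp

lemma pvGo_cons (c : Char) (p : List Char) (ps : List (List Char)) :
    pvGo ((c :: p) :: ps) = c :: pvGo (p :: ps) := by
  cases ps with
  | nil => simp [pvGo]
  | cons q rest => simp [pvGo]

lemma pvMain (cs : List Char) :
    (pvRunA .OutsideQuote cs = pvGo (pvSplitQ cs)) ∧
    (∀ (b : Bool) (q : List Char) (rest : List (List Char)), pvSplitQ cs = q :: rest →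
      pvRunA (pvStB b) cs =
        (pvScan b q).1 ++ (if rest = [] then [] else pvClose (pvScan b q).2) ++ pvGo rest) := by
  induction cs with
  | nil =>
      constructor
      · simp [pvRunA, pvSplitQ, pvGo]
      · intro b q rest h
        simp [pvSplitQ] at h
        obtain ⟨hq, hr⟩ := h
        subst hq; subst hr
        cases b <;> simp [pvRunA, pvScan, pvGo]
  | cons c t ih =>
      obtain ⟨ih1, ih2⟩ := ih
      by_cases hc : c = '"'
      · subst hc
        obtain ⟨p, ps, hsplit⟩ : ∃ p ps, pvSplitQ t = p :: ps := by
          cases h : pvSplitQ t with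
          | nil => exact absurd h (pvSplitQ_ne_nil t)
          | cons p ps => exact ⟨p, ps, rfl⟩
        constructor
        · have h2 := ih2 false p ps hsplit
          simp only [pvStB] at h2
          simp [pvRunA, pvSplitQ, hsplit, pvGo, h2, List.append_assoc]
        · intro b q rest h
          simp only [pvSplitQ, if_pos] at h
          obtain ⟨hq, hrest⟩ := List.cons.inj h
          subst hq
          subst hrest
          cases b <;>
            simp [pvRunA, pvStB, pvScan, pvClose, pvSplitQ_ne_nil t, ← ih1]
      · obtain ⟨p, ps, hsplit⟩ : ∃ p ps, pvSplitQ t = p :: ps := by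
          cases h : pvSplitQ t with
          | nil => exact absurd h (pvSplitQ_ne_nil t)
          | cons p ps => exact ⟨p, ps, rfl⟩
        have hsq : pvSplitQ (c :: t) = (c :: p) :: ps := by
          simp [pvSplitQ, hc, hsplit]
        constructor
        · simp only [pvRunA, if_neg hc, hsq, pvGo_cons, ih1, hsplit]
        · intro b q rest h
          rw [hsq] at h
          obtain ⟨hq, hrest⟩ := List.cons.inj h
          subst hq; subst hrest
          cases b with
          | false =>
              by_cases hd : c = '$'
              · subst hd
                have := ih2 true p ps hsplit
                simp_all [pvRunA, pvStB, pvScan, List.append_assoc]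
              · have := ih2 false p ps hsplit
                simp_all [pvRunA, pvStB, pvScan, List.append_assoc]
          | true =>
              by_cases hd : c = ' '
              · subst hd
                have := ih2 false p ps hsplit
                simp_all [pvRunA, pvStB, pvScan, List.append_assoc]
              · have := ih2 true p ps hsplit
                simp_all [pvRunA, pvStB, pvScan, List.append_assoc]

-- ===== VERDICT (by name: the statement is the Claim_ definition above) =====
theorem preprocess_quotes_spec : Claim_equal_preprocess_quotes := by
  intro s _
  show preprocess_quotes s = preprocess_quotes_alt s
  have h : (preprocess_quotes s).toList = (preprocess_quotes_alt s).toList := by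
    unfold preprocess_quotes preprocess_quotes_alt
    rw [pvFoldA s.toList "" .OutsideQuote, (pvMain s.toList).1]
    simp
  calc preprocess_quotes s = String.ofList (preprocess_quotes s).toList := (String.ofList_toList).symm
    _ = String.ofList (preprocess_quotes_alt s).toList := by rw [h]
    _ = preprocess_quotes_alt s := String.ofList_toList
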